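-- pv_equiv track=rewrite | github.com/HumblePiCCI/Assessor | marking_framework/scripts/committee_edge_resolver.py | claim_refutation_addresses_interpretation
-- ===== SOURCE A (Python) =====
-- CLAIM_REFUTATION_MARKERS = frozenset(
--     {
--         "because",
--         "but",
--         "whereas",
--         "while",
--         "although",
--         "fails",
--         "does not",
--         "doesn't",
--         "not actually",
--         "only",
--         "rather than",
--         "instead",
--         "mostly",
--         "unsupported",
--         "underdeveloped",
--     }
-- )
--
-- CLAIM_REFUTATION_CONTENT_KEYWORDS = frozenset(
--     {
--         "interpret",
--         "interpretive",
--         "interpretation",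
--         "meaning",
--         "claim",
--         "theme",
--         "content",
--         "accountability",
--         "identity",
--         "trauma",
--         "healing",
--         "trust",
--         "support",
--         "consequence",
--         "consequences",
--         "growth",
--         "change",
--         "responsibility",
--         "character",
--         "lesson",
--         "why",
--         "shows",
--         "reveals",
--         "suggests",
--         "proves",
--     }
-- )
--
-- def claim_refutation_text(edge: dict, field: str) -> str:
--     return str(edge.get(field) or "").strip()
--
-- def claim_refutation_addresses_interpretation(edge: dict) -> bool:
--     combined = " ".join(
--         claim_refutation_text(edge, field).lower()
--         for field in ("loser_interpretive_claim", "winner_counterclaim", "loser_claim_refutation")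
--     )
--     has_refutation_marker = any(marker in combined for marker in CLAIM_REFUTATION_MARKERS)
--     has_content_keyword = any(keyword in combined for keyword in CLAIM_REFUTATION_CONTENT_KEYWORDS)
--     return has_refutation_marker and has_content_keyword
-- ===== SOURCE B (Python) =====
-- CLAIM_REFUTATION_MARKERS = (
--     "because", "but", "whereas", "while", "although", "fails", "does not",
--     "doesn't", "not actually", "only", "rather than", "instead", "mostly",
--     "unsupported", "underdeveloped",
-- )
--
-- CLAIM_REFUTATION_CONTENT_KEYWORDS = (
--     "interpret", "interpretive", "interpretation", "meaning", "claim", "theme",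
--     "content", "accountability", "identity", "trauma", "healing", "trust",
--     "support", "consequence", "consequences", "growth", "change",
--     "responsibility", "character", "lesson", "why", "shows", "reveals",
--     "suggests", "proves",
-- )
--
--
-- def claim_refutation_addresses_interpretation(edge: dict) -> bool:
--     # Single left-to-right scan of the combined text: at each position test
--     # whether a marker or a keyword starts there; stop as soon as both kinds
--     # have been seen.
--     parts = []
--     for field in ("loser_interpretive_claim", "winner_counterclaim", "loser_claim_refutation"):
--         parts.append(str(edge.get(field) or "").strip().lower())
--     combined = " ".join(parts)
--     marker = keyword = False
--     for i in range(len(combined)):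
--         if marker and keyword:
--             break
--         if not marker and any(combined.startswith(m, i) for m in CLAIM_REFUTATION_MARKERS):
--             marker = True
--         if not keyword and any(combined.startswith(k, i) for k in CLAIM_REFUTATION_CONTENT_KEYWORDS):
--             keyword = True
--     return marker and keyword
-- ===== Notes on version B (the rewrite author's own statement) =====
-- stated objective: alternative
-- what changed: Replaces the two per-term whole-text substring searches (any(term in combined) over each set) with one left-to-right scan of the combined text that, at each position, tests whether a marker or keyword starts there and stops early once both kinds are found.
import Mathlib
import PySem

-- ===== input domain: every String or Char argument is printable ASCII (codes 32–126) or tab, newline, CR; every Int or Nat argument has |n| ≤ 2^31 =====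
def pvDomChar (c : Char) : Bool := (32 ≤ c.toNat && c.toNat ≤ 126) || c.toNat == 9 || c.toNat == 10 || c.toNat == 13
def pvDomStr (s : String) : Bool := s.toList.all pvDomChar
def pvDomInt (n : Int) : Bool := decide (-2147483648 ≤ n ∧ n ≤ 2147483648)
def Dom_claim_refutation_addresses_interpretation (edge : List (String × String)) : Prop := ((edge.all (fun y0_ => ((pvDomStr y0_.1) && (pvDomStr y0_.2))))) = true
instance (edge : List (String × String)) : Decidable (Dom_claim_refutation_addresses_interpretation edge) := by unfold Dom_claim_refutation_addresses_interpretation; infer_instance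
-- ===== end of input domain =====

-- B replaces the two per-term whole-text substring searches with one left-to-right
-- positional scan of the combined text with early exit (alternative decomposition, same cost).

-- ===== PORT A =====
def crMarkers : List String :=
  ["because", "but", "whereas", "while", "although", "fails", "does not",
   "doesn't", "not actually", "only", "rather than", "instead", "mostly",
   "unsupported", "underdeveloped"]

def crKeywords : List String :=
  ["interpret", "interpretive", "interpretation", "meaning", "claim", "theme",
   "content", "accountability", "identity", "trauma", "healing", "trust",
   "support", "consequence", "consequences", "growth", "change",
   "responsibility", "character", "lesson", "why", "shows", "reveals",
   "suggests", "proves"]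

def crFields : List String :=
  ["loser_interpretive_claim", "winner_counterclaim", "loser_claim_refutation"]

-- claim_refutation_text(edge, field) = str(edge.get(field) or "").strip()
def claim_refutation_text (edge : List (String × String)) (field : String) : String :=
  PySem.Str.strip ((PySem.Dict.get? (PySem.Dict.mk edge) field).getD "")

def claim_refutation_addresses_interpretation (edge : List (String × String)) : Bool :=
  let combined := PySem.Str.join " "
    (crFields.map (fun field => PySem.Str.lower (claim_refutation_text edge field)))
  let has_refutation_marker := crMarkers.any (fun marker => PySem.Str.isIn marker combined)
  let has_content_keyword := crKeywords.any (fun keyword => PySem.Str.isIn keyword combined)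
  has_refutation_marker && has_content_keyword

-- ===== PORT B =====
-- the positional scan of Source B: at each suffix test both term lists, early exit when both found
def crScan (ms ks : List (List Char)) : List Char → Bool → Bool → Bool
  | _, true, true => true
  | [], mk, kw => mk && kw
  | c :: rest, mk, kw =>
      crScan ms ks rest
        (mk || ms.any (fun m => PySem.Chars.startswith (c :: rest) m))
        (kw || ks.any (fun k => PySem.Chars.startswith (c :: rest) k))

def claim_refutation_addresses_interpretation_alt (edge : List (String × String)) : Bool :=
  let parts := crFields.foldl
    (fun acc field =>
      acc ++ [PySem.Str.lower (PySem.Str.strip ((PySem.Dict.get? (PySem.Dict.mk edge) field).getD ""))]) []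
  let combined := PySem.Str.join " " parts
  crScan (crMarkers.map String.toList) (crKeywords.map String.toList) combined.toList false false

-- ===== PRECONDITION & SPEC =====
def Spec_claim_refutation_addresses_interpretation (edge : List (String × String)) (out : Bool) : Prop := out = claim_refutation_addresses_interpretation_alt edge
instance (edge : List (String × String)) (out : Bool) : Decidable (Spec_claim_refutation_addresses_interpretation edge out) := by unfold Spec_claim_refutation_addresses_interpretation; infer_instance

-- ===== CLAIM (what is proved, stated in full; the proofs are below) =====
def Claim_equal_claim_refutation_addresses_interpretation : Prop := ∀ (edge : List (String × String)), Dom_claim_refutation_addresses_interpretation edge → Spec_claim_refutation_addresses_interpretation edge (claim_refutation_addresses_interpretation edge)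

-- ===== LEMMAS AND PROOFS =====
-- a term is a substring of c :: rest iff it starts at the head or is a substring of rest
lemma any_isIn_cons (L : List (List Char)) (c : Char) (rest : List Char) :
    L.any (fun m => PySem.Chars.isIn m (c :: rest))
      = (L.any (fun m => PySem.Chars.startswith (c :: rest) m)
          || L.any (fun m => PySem.Chars.isIn m rest)) := by
  rw [Bool.eq_iff_iff]
  simp only [List.any_eq_true, Bool.or_eq_true, PySem.Chars.isIn_iff_infix,
    PySem.Chars.startswith_iff, List.infix_cons_iff]
  constructor
  · rintro ⟨m, hm, h | h⟩
    · exact Or.inl ⟨m, hm, h⟩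
    · exact Or.inr ⟨m, hm, h⟩
  · rintro (⟨m, hm, h⟩ | ⟨m, hm, h⟩)
    · exact ⟨m, hm, Or.inl h⟩
    · exact ⟨m, hm, Or.inr h⟩

-- the scan computes exactly "some marker occurs" && "some keyword occurs"
lemma crScan_eq (ms ks : List (List Char)) (hm : ∀ m ∈ ms, m ≠ []) (hk : ∀ k ∈ ks, k ≠ []) :
    ∀ (s : List Char) (mk kw : Bool),
      crScan ms ks s mk kw
        = ((mk || ms.any (fun m => PySem.Chars.isIn m s))
            && (kw || ks.any (fun k => PySem.Chars.isIn k s))) := by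
  intro s
  induction s with
  | nil =>
      intro mk kw
      have hms : ms.any (fun m => PySem.Chars.isIn m []) = false := by
        simp only [List.any_eq_false]
        intro m hmem
        simpa [PySem.Chars.isIn_iff_infix] using hm m hmem
      have hks : ks.any (fun k => PySem.Chars.isIn k []) = false := by
        simp only [List.any_eq_false]
        intro k hmem
        simpa [PySem.Chars.isIn_iff_infix] using hk k hmem
      cases mk <;> cases kw <;> simp [crScan, hms, hks]
  | cons c rest ih =>
      intro mk kw
      rcases Bool.eq_false_or_eq_true mk with hmk | hmk <;>
        rcases Bool.eq_false_or_eq_true kw with hkw | hkw <;>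
          subst hmk <;> subst hkw <;>
            simp [crScan, ih, any_isIn_cons]

-- ===== VERDICT (by name: the statement is the Claim_ definition above) =====
theorem claim_refutation_addresses_interpretation_spec : Claim_equal_claim_refutation_addresses_interpretation := by
  intro edge _
  unfold Spec_claim_refutation_addresses_interpretation
  unfold claim_refutation_addresses_interpretation claim_refutation_addresses_interpretation_alt
  rw [crScan_eq _ _ (by decide) (by decide)]
  simp only [crFields, claim_refutation_text, List.foldl, List.map, List.nil_append,
    List.cons_append, List.any_map, Function.comp_def, PySem.Str.isIn_eq, Bool.false_or]
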